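-- pv_equiv track=rewrite | github.com/Stablesj/joolz | src/tasker/countdown.py | get_number_lines
-- ===== SOURCE A (Python) =====
-- CHARS = {
--     "0": "██████\n██  ██\n██  ██\n██  ██\n██████",
--     "1": "   ██ \n  ███ \n   ██ \n   ██ \n   ██ ",
--     "2": "██████\n    ██\n██████\n██    \n██████",
--     "3": "██████\n    ██\n █████\n    ██\n██████",
--     "4": "██  ██\n██  ██\n██████\n    ██\n    ██",
--     "5": "██████\n██    \n██████\n    ██\n██████",
--     "6": "██████\n██    \n██████\n██  ██\n██████",
--     "7": "██████\n    ██\n   ██ \n  ██  \n  ██  ",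
--     "8": " ████ \n██  ██\n ████ \n██  ██\n ████ ",
--     "9": "██████\n██  ██\n██████\n    ██\n █████",
--     ":": "  \n██\n  \n██\n  ",
-- }
--
-- def get_number_lines(seconds):
--     """Return list of lines which make large MM:SS glyphs for given seconds."""
--     lines = [""] * 5
--     minutes, seconds = divmod(seconds, 60)
--     time = f"{minutes:02d}:{seconds:02d}"
--     for char in time:
--         char_lines = CHARS[char].splitlines()
--         for i, line in enumerate(char_lines):
--             lines[i] += line + " "
--     # lines = ["Task title"] + [""] * 3 + lines
--     return lines
-- ===== SOURCE B (Python) =====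
-- # Bitmap font: each glyph is (width, 5 row bitmasks); a set bit is a filled cell.
-- FONT = {
--     "0": (6, [63, 51, 51, 51, 63]),
--     "1": (6, [6, 14, 6, 6, 6]),
--     "2": (6, [63, 3, 63, 48, 63]),
--     "3": (6, [63, 3, 31, 3, 63]),
--     "4": (6, [51, 51, 63, 3, 3]),
--     "5": (6, [63, 48, 63, 3, 63]),
--     "6": (6, [63, 48, 63, 51, 63]),
--     "7": (6, [63, 3, 6, 12, 12]),
--     "8": (6, [30, 51, 30, 51, 30]),
--     "9": (6, [63, 51, 63, 3, 31]),
--     ":": (2, [0, 3, 0, 3, 0]),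
-- }
--
-- def render(width, mask):
--     """Render one glyph row from its bitmask, most significant bit first."""
--     return "".join("█" if mask >> (width - 1 - j) & 1 else " " for j in range(width))
--
-- def get_number_lines(seconds):
--     """Return list of lines which make large MM:SS glyphs for given seconds."""
--     minutes, seconds = divmod(seconds, 60)
--     time = f"{minutes:02d}:{seconds:02d}"
--     rows = []
--     for i in range(5):
--         cells = []
--         for c in time:
--             width, bitmap = FONT[c]
--             cells.append(render(width, bitmap[i]) + " ")
--         rows.append("".join(cells))
--     return rows
-- ===== Notes on version B (the rewrite author's own statement) =====
-- stated objective: alternative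
-- what changed: B replaces A's string glyph table and five incremental per-row string accumulators by a numeric bitmap font (width + 5 row bitmasks per glyph) and renders each output row independently by bit-testing the masks.
import Mathlib
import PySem

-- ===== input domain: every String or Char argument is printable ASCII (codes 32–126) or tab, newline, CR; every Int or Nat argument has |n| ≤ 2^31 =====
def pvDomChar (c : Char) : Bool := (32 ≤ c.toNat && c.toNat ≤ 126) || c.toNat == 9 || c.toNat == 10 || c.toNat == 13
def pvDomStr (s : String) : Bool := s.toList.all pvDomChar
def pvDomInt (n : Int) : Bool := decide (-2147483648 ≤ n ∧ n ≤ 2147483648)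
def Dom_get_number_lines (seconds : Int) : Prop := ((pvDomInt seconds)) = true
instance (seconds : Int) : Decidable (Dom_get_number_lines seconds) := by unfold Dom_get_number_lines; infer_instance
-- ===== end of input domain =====

-- B stores the font as numeric bitmaps (width + 5 row bitmasks per glyph) and renders each of the
-- 5 output rows independently by bit-testing, instead of A's per-row string accumulators fed from
-- the string glyph table (objective: alternative).


-- ===== PORT A =====
-- CHARS[c].splitlines(), tabulated per key (the splitlines of each module-constant glyph is
-- precomputed here). Within Pre_ every char of `time` is a digit or ':'; the catch-all arm stands
-- in for Python's KeyError (excluded by Pre_) and never influences any claimed input.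
def charLines (c : Char) : List String :=
  match c with
  | '0' => ["██████", "██  ██", "██  ██", "██  ██", "██████"]
  | '1' => ["   ██ ", "  ███ ", "   ██ ", "   ██ ", "   ██ "]
  | '2' => ["██████", "    ██", "██████", "██    ", "██████"]
  | '3' => ["██████", "    ██", " █████", "    ██", "██████"]
  | '4' => ["██  ██", "██  ██", "██████", "    ██", "    ██"]
  | '5' => ["██████", "██    ", "██████", "    ██", "██████"]
  | '6' => ["██████", "██    ", "██████", "██  ██", "██████"]
  | '7' => ["██████", "    ██", "   ██ ", "  ██  ", "  ██  "]
  | '8' => [" ████ ", "██  ██", " ████ ", "██  ██", " ████ "]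
  | '9' => ["██████", "██  ██", "██████", "    ██", " █████"]
  | ':' => ["  ", "██", "  ", "██", "  "]
  | _   => ["  ", "  ", "  ", "  ", "  "]

-- f"{n:02d}": pad str(n) with '0' to width 2 (exact also for negatives: "-1" already has width 2)
def pad2 (n : Int) : String :=
  let s := PySem.Int.toStr n
  if PySem.Str.len s < 2 then "0" ++ s else s

-- the inner `for i, line in enumerate(char_lines): lines[i] += line + " "`
-- (every glyph has 5 lines, so each enumerate index i is 0..4, nonnegative and in range:
-- .toNat/getD/set are exact there)
def stepA (lines : List String) (c : Char) : List String :=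
  (PySem.List.enumerate (charLines c)).foldl
    (fun ls p => ls.set p.1.toNat (ls.getD p.1.toNat "" ++ p.2 ++ " ")) lines

def get_number_lines (seconds : Int) : List String :=
  let lines : List String := List.replicate 5 ""
  let minutes := PySem.Int.floordiv seconds 60
  let secs := PySem.Int.mod seconds 60
  let time := pad2 minutes ++ ":" ++ pad2 secs
  time.toList.foldl stepA lines

-- ===== PORT B =====
-- FONT[c]: (width, 5 row bitmasks); the catch-all arm stands in for Python's KeyError
-- (excluded by Pre_) and never influences any claimed input.
def font (c : Char) : Nat × List Nat :=
  match c with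
  | '0' => (6, [63, 51, 51, 51, 63])
  | '1' => (6, [6, 14, 6, 6, 6])
  | '2' => (6, [63, 3, 63, 48, 63])
  | '3' => (6, [63, 3, 31, 3, 63])
  | '4' => (6, [51, 51, 63, 3, 3])
  | '5' => (6, [63, 48, 63, 3, 63])
  | '6' => (6, [63, 48, 63, 51, 63])
  | '7' => (6, [63, 3, 6, 12, 12])
  | '8' => (6, [30, 51, 30, 51, 30])
  | '9' => (6, [63, 51, 63, 3, 31])
  | ':' => (2, [0, 3, 0, 3, 0])
  | _   => (2, [0, 0, 0, 0, 0])

-- render(width, mask): one glyph row from its bitmask, most significant bit first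
def renderMask (width mask : Nat) : String :=
  String.mk ((List.range width).map (fun j => if (mask >>> (width - 1 - j)) % 2 = 1 then '█' else ' '))

def get_number_lines_alt (seconds : Int) : List String :=
  let minutes := PySem.Int.floordiv seconds 60
  let secs := PySem.Int.mod seconds 60
  let time := pad2 minutes ++ ":" ++ pad2 secs
  (List.range 5).map (fun i =>
    String.join (time.toList.map (fun c =>
      renderMask (font c).1 ((font c).2.getD i 0) ++ " ")))

-- ===== PRECONDITION & SPEC =====
-- Pre_ excludes negative seconds, on which Python A raises KeyError('-') (the minus sign is not a CHARS key).
def Pre_get_number_lines (seconds : Int) : Prop := 0 ≤ seconds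
instance (seconds : Int) : Decidable (Pre_get_number_lines seconds) := by unfold Pre_get_number_lines; infer_instance
def pvWitness_get_number_lines : Int := (65)

def Spec_get_number_lines (seconds : Int) (out : List String) : Prop := out = get_number_lines_alt seconds
instance (seconds : Int) (out : List String) : Decidable (Spec_get_number_lines seconds out) := by unfold Spec_get_number_lines; infer_instance

-- ===== CLAIM (what is proved, stated in full; the proofs are below) =====
def Claim_equal_get_number_lines : Prop := ∀ (seconds : Int), Dom_get_number_lines seconds → Pre_get_number_lines seconds → Spec_get_number_lines seconds (get_number_lines seconds)

-- ===== LEMMAS AND PROOFS =====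

-- row i of A's output, as a function of the char list
def rowJoin (i : Nat) (cs : List Char) : String :=
  String.join (cs.map (fun c => (charLines c).getD i "" ++ " "))

theorem foldl_sappend_shift (l : List String) (a b : String) :
    l.foldl (· ++ ·) (a ++ b) = a ++ l.foldl (· ++ ·) b := by
  induction l generalizing b with
  | nil => rfl
  | cons x xs ih => simpa [String.append_assoc] using ih (b ++ x)

theorem join_cons (a : String) (l : List String) :
    String.join (a :: l) = a ++ String.join l := by
  simpa [String.join] using foldl_sappend_shift l a ""

theorem charLines_shape (c : Char) :
    ∃ l0 l1 l2 l3 l4, charLines c = [l0, l1, l2, l3, l4] := by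
  unfold charLines; split <;> exact ⟨_, _, _, _, _, rfl⟩

theorem rowJoin_cons (i : Nat) (c : Char) (cs : List Char) :
    rowJoin i (c :: cs) = ((charLines c).getD i "" ++ " ") ++ rowJoin i cs := by
  simp [rowJoin, join_cons]

theorem foldA_spec (cs : List Char) (a0 a1 a2 a3 a4 : String) :
    cs.foldl stepA [a0, a1, a2, a3, a4] =
      [a0 ++ rowJoin 0 cs, a1 ++ rowJoin 1 cs, a2 ++ rowJoin 2 cs,
       a3 ++ rowJoin 3 cs, a4 ++ rowJoin 4 cs] := by
  induction cs generalizing a0 a1 a2 a3 a4 with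
  | nil => simp [rowJoin, String.join]
  | cons c cs ih =>
      obtain ⟨l0, l1, l2, l3, l4, h⟩ := charLines_shape c
      have hstep : stepA [a0, a1, a2, a3, a4] c =
          [a0 ++ l0 ++ " ", a1 ++ l1 ++ " ", a2 ++ l2 ++ " ", a3 ++ l3 ++ " ", a4 ++ l4 ++ " "] := by
        simp [stepA, h, PySem.List.enumerate]
      simp only [List.foldl_cons, hstep, ih, rowJoin_cons, h, List.getD, String.append_assoc]
      rfl

-- the bitmap render of glyph c agrees row by row with A's string table
theorem font_render (c : Char) :
    (List.range 5).map (fun i => renderMask (font c).1 ((font c).2.getD i 0)) = charLines c := by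
  unfold font charLines
  split <;> decide

theorem font_render_getD (c : Char) (i : Nat) (hi : i < 5) :
    renderMask (font c).1 ((font c).2.getD i 0) = (charLines c).getD i "" := by
  have h := font_render c
  have : ((List.range 5).map (fun i => renderMask (font c).1 ((font c).2.getD i 0))).getD i ""
      = (charLines c).getD i "" := by rw [h]
  simpa [List.getD_map, List.getD_eq_getElem?_getD, hi] using this

theorem rowB_eq_rowJoin (i : Nat) (hi : i < 5) (cs : List Char) :
    String.join (cs.map (fun c => renderMask (font c).1 ((font c).2.getD i 0) ++ " "))
      = rowJoin i cs := by
  unfold rowJoin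
  congr 1
  exact List.map_congr_left (fun c _ => by rw [font_render_getD c i hi])

theorem range5_map {α : Type} (f : Nat → α) :
    (List.range 5).map f = [f 0, f 1, f 2, f 3, f 4] := by
  rfl

-- ===== VERDICT (by name: the statement is the Claim_ definition above) =====
theorem get_number_lines_spec : Claim_equal_get_number_lines := by
  intro seconds _ _
  unfold Spec_get_number_lines get_number_lines get_number_lines_alt
  simp only [List.replicate]
  rw [foldA_spec]
  rw [range5_map]
  simp only [rowB_eq_rowJoin 0 (by omega), rowB_eq_rowJoin 1 (by omega),
    rowB_eq_rowJoin 2 (by omega), rowB_eq_rowJoin 3 (by omega), rowB_eq_rowJoin 4 (by omega)]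
  simp
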